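-- pv_equiv track=rewrite | github.com/Madhax/Kata | google/minNumberOperations/optimal.py | minNumberOperations
-- ===== SOURCE A (Python) =====
-- from typing import List
--
-- def minNumberOperations(target: List[int]) -> int:
--
--     prev = 0
--
--     calc = 0
--     for x in target:
--         if x - prev > 0:
--             calc += (x-prev)
--
--         prev = x
--
--     return calc
-- ===== SOURCE B (Python) =====
-- from typing import List
--
-- def minNumberOperations(target: List[int]) -> int:
--     # closed-form identity: answer = (total variation from 0 + last element) / 2
--     if not target:
--         return 0
--     tv = abs(target[0]) + sum(abs(b - a) for a, b in zip(target, target[1:]))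
--     return (tv + target[-1]) // 2
-- ===== Notes on version B (the rewrite author's own statement) =====
-- stated objective: alternative
-- what changed: Replaces the running prev/calc accumulation of positive differences by the algebraic identity answer = (|x0| + sum of |consecutive differences| + last element) / 2, computed from the zipped difference list in one arithmetic expression.
import Mathlib
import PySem

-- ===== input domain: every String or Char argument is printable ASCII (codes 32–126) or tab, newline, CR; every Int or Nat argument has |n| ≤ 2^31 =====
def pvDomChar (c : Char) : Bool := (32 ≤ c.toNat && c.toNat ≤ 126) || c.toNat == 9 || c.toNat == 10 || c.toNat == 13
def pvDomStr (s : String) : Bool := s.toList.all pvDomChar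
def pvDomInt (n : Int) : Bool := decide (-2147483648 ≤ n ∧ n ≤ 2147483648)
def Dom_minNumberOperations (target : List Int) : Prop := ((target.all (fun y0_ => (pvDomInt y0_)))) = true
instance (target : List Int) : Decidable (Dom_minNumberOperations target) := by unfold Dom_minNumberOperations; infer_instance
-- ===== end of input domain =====

-- B replaces A's running positive-difference accumulation by the closed arithmetic
-- identity answer = (|x0| + total variation + last) / 2; same O(n) cost, alternative algorithm.


-- ===== PORT A =====
-- state (prev, calc); the loop body checks x - prev > 0 with the old prev, then sets prev := x
def minNumberOperations (target : List Int) : Int :=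
  (target.foldl
    (fun (s : Int × Int) x => (x, if x - s.1 > 0 then s.2 + (x - s.1) else s.2))
    (0, 0)).2

-- ===== PORT B =====
-- target[1:] on a list is List.drop 1 (exact: nonnegative start slice); target[-1] on the
-- nonempty list is List.getLastD target 0 (exact: the list is nonempty in that branch)
def minNumberOperations_alt (target : List Int) : Int :=
  match target with
  | [] => 0
  | x :: _ =>
    let tv : Int := |x| + (((target.zip (target.drop 1)).map (fun p => |p.2 - p.1|)).sum)
    PySem.Int.floordiv (tv + target.getLastD 0) 2

-- ===== PRECONDITION & SPEC =====
def Spec_minNumberOperations (target : List Int) (out : Int) : Prop := out = minNumberOperations_alt target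
instance (target : List Int) (out : Int) : Decidable (Spec_minNumberOperations target out) := by unfold Spec_minNumberOperations; infer_instance

-- ===== CLAIM (what is proved, stated in full; the proofs are below) =====
def Claim_equal_minNumberOperations : Prop := ∀ (target : List Int), Dom_minNumberOperations target → Spec_minNumberOperations target (minNumberOperations target)

-- ===== LEMMAS AND PROOFS =====

-- recursive characterisation of A's loop
def pvF (p : Int) : List Int → Int
  | [] => 0
  | x :: xs => (if x - p > 0 then x - p else 0) + pvF x xs

-- sum of |consecutive differences| starting from p
def pvTV (p : Int) : List Int → Int
  | [] => 0
  | x :: xs => |x - p| + pvTV x xs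

lemma pvFoldl_eq (xs : List Int) : ∀ p c,
    (xs.foldl (fun (s : Int × Int) x => (x, if x - s.1 > 0 then s.2 + (x - s.1) else s.2)) (p, c)).2
      = c + pvF p xs := by
  induction xs with
  | nil => intro p c; simp [pvF]
  | cons x xs ih =>
    intro p c
    simp only [List.foldl, pvF, ih]
    split_ifs <;> ring

lemma pvZip_eq (xs : List Int) : ∀ p,
    (((p :: xs).zip xs).map (fun q => |q.2 - q.1|)).sum = pvTV p xs := by
  induction xs with
  | nil => intro p; simp [pvTV]
  | cons x xs ih => intro p; simp [pvTV, ih]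

lemma pvKey (xs : List Int) : ∀ p, 2 * pvF p xs = pvTV p xs + (xs.getLastD p - p) := by
  induction xs with
  | nil => intro p; simp [pvF, pvTV]
  | cons x xs ih =>
    intro p
    have h := ih x
    simp only [pvF, pvTV, List.getLastD_cons]
    split_ifs with hx
    · rw [abs_of_pos (by omega : (0:Int) < x - p)] at *; omega
    · rw [abs_of_nonpos (by omega : (x - p : Int) ≤ 0)] at *; omega

-- ===== VERDICT (by name: the statement is the Claim_ definition above) =====
theorem minNumberOperations_spec : Claim_equal_minNumberOperations := by
  intro target _
  show minNumberOperations target = minNumberOperations_alt target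
  cases target with
  | nil => rfl
  | cons x xs =>
    have hA : minNumberOperations (x :: xs) = pvF 0 (x :: xs) := by
      rw [minNumberOperations, pvFoldl_eq]; ring
    have hz : (((x :: xs).zip ((x :: xs).drop 1)).map (fun q => |q.2 - q.1|)).sum
        = pvTV x xs := by simpa using pvZip_eq xs x
    have hk := pvKey (x :: xs) 0
    have hkey : 2 * pvF 0 (x :: xs) = |x| + pvTV x xs + (x :: xs).getLastD 0 := by
      simp only [pvTV, sub_zero] at hk
      omega
    simp only [minNumberOperations_alt, hz]
    rw [hA]
    have h2 : |x| + pvTV x xs + (x :: xs).getLastD 0 = pvF 0 (x :: xs) * 2 := by omega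
    rw [show (|x| + (pvTV x xs) + (x :: xs).getLastD 0 : Int) = pvF 0 (x :: xs) * 2 from h2] at *
    have := PySem.Int.floordiv_eq_ediv_of_pos (a := pvF 0 (x :: xs) * 2) (b := 2) (by omega)
    rw [h2, this, Int.mul_ediv_cancel _ (by omega)]
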